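-- pv_equiv track=rewrite | github.com/daniel-reich/ubiquitous-fiesta | dRjHygERcDJpiDzze_10.py | lengthen
-- ===== SOURCE A (Python) =====
-- def lengthen(s1, s2):
--   if len(s1) > len(s2):
--     long = s1
--     short = s2
--   else:
--     long = s2
--     short = s1
--   new = []
--   for i in range(len(long)):
--     new.append(short[i%len(short)])
--   return ''.join(new)
-- ===== SOURCE B (Python) =====
-- def lengthen(s1, s2):
--   if len(s1) > len(s2):
--     long, short = s1, s2
--   else:
--     long, short = s2, s1
--   if not long:
--     return ''
--   return (short * (len(long) // len(short) + 1))[:len(long)]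
-- ===== Notes on version B (the rewrite author's own statement) =====
-- stated objective: simpler
-- what changed: Replaces the per-character indexing loop with a closed-form repeat-and-truncate: the shorter string is replicated enough times and sliced to the longer string's length.
import Mathlib
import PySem

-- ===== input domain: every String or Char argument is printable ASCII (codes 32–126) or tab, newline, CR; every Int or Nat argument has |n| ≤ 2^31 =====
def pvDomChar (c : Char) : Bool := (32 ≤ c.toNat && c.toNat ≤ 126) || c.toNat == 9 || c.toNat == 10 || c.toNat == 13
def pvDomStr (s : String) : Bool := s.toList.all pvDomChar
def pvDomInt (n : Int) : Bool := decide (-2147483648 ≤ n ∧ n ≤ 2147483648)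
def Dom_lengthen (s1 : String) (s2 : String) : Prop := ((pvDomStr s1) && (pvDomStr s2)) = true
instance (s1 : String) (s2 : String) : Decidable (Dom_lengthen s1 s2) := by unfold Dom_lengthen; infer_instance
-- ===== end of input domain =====

-- B replaces A's per-character indexing loop by a closed-form repeat-and-truncate (simpler); same values everywhere inside Pre_.

-- ===== PORT A =====
-- literal port of A: pick long/short by length, then for i in range(len(long)) append short[i % len(short)]
def lengthen (s1 : String) (s2 : String) : String :=
  let long : List Char := if s1.toList.length > s2.toList.length then s1.toList else s2.toList
  let short : List Char := if s1.toList.length > s2.toList.length then s2.toList else s1.toList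
  let new : List Char :=
    (PySem.List.pyRange 0 (long.length : Int) 1).foldl
      (fun acc i => acc ++ (PySem.List.pyGet? short (PySem.Int.mod i (short.length : Int))).toList) []
  String.ofList new

-- ===== PORT B =====
-- literal port of Source B: same long/short selection, early '' on empty long, then repeat-and-truncate
def lengthen_alt (s1 : String) (s2 : String) : String :=
  let long : List Char := if s1.toList.length > s2.toList.length then s1.toList else s2.toList
  let short : List Char := if s1.toList.length > s2.toList.length then s2.toList else s1.toList
  if long.isEmpty then "" else
  String.ofList ((List.replicate (long.length / short.length + 1) short).flatten.take long.length)

-- ===== PRECONDITION & SPEC =====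
-- Pre_ excludes exactly the inputs where A raises ZeroDivisionError (one string empty, the other not);
-- B raises there too, so nothing returned by A is excluded.
def Pre_lengthen (s1 : String) (s2 : String) : Prop := (s1 = "" ↔ s2 = "")
instance (s1 : String) (s2 : String) : Decidable (Pre_lengthen s1 s2) := by unfold Pre_lengthen; infer_instance
def pvWitness_lengthen : String × String := ("ab", "xyz")
def Spec_lengthen (s1 : String) (s2 : String) (out : String) : Prop := out = lengthen_alt s1 s2
instance (s1 : String) (s2 : String) (out : String) : Decidable (Spec_lengthen s1 s2 out) := by unfold Spec_lengthen; infer_instance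

-- ===== CLAIM (what is proved, stated in full; the proofs are below) =====
def Claim_equal_lengthen : Prop := ∀ (s1 : String) (s2 : String), Dom_lengthen s1 s2 → Pre_lengthen s1 s2 → Spec_lengthen s1 s2 (lengthen s1 s2)

-- ===== LEMMAS AND PROOFS =====

-- the cyclic character: l[k % len l], with l.headI as (never-used) default
def cyc {α : Type} [Inhabited α] (l : List α) (k : Nat) : α := l.getD (k % l.length) l.headI

lemma take_cyc {α : Type} [Inhabited α] (l : List α) (n : Nat) (h : n ≤ l.length) :
    l.take n = (List.range n).map (cyc l) := by
  apply List.ext_getElem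
  · simpa using h
  · intro i h1 h2
    have hin : i < n := by simpa using h2
    have hi : i < l.length := lt_of_lt_of_le hin h
    simp only [List.getElem_take, List.getElem_map, List.getElem_range, cyc]
    rw [Nat.mod_eq_of_lt hi, List.getD_eq_getElem _ _ hi]

lemma flatten_replicate_take {α : Type} [Inhabited α] (l : List α) (hl : l ≠ []) :
    ∀ (q n : Nat), n ≤ q * l.length →
    (List.replicate q l).flatten.take n = (List.range n).map (cyc l) := by
  intro q
  induction q with
  | zero => intro n h; simp at h; simp [h]
  | succ q ih =>
    intro n h
    have hm : 0 < l.length := List.length_pos_iff.mpr hl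
    by_cases hn : n ≤ l.length
    · rw [List.replicate_succ, List.flatten_cons, List.take_append_of_le_length hn]
      exact take_cyc l n hn
    · push Not at hn
      rw [List.replicate_succ, List.flatten_cons, List.take_append]
      have hrec : (List.replicate q l).flatten.take (n - l.length) =
          (List.range (n - l.length)).map (cyc l) := by
        apply ih; have : (q + 1) * l.length = q * l.length + l.length := by ring
        omega
      rw [List.take_of_length_le (le_of_lt hn), hrec]
      have hsplit : List.range n = List.range l.length ++ (List.range (n - l.length)).map (l.length + ·) := by
        conv_lhs => rw [show n = l.length + (n - l.length) by omega]
        rw [List.range_add]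
      rw [hsplit, List.map_append, List.map_map]
      congr 1
      · -- (range len).map (cyc l) = l
        have h2 := take_cyc l l.length le_rfl
        simp only [List.take_length] at h2
        exact h2
      · apply List.map_congr_left
        intro k _
        simp only [Function.comp_apply, cyc, Nat.add_mod_left]

lemma foldl_loop_eq {α : Type} [Inhabited α] (short : List α) (hs : short ≠ []) (n : Nat) :
    (PySem.List.pyRange 0 (n : Int) 1).foldl
      (fun acc i => acc ++ (PySem.List.pyGet? short (PySem.Int.mod i (short.length : Int))).toList) []
    = (List.range n).map (cyc short) := by
  have hm : 0 < short.length := List.length_pos_iff.mpr hs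
  induction n with
  | zero => simp [PySem.List.pyRange_one_eq_nil]
  | succ n ih =>
    have hstep : PySem.List.pyRange 0 ((n + 1 : Nat) : Int) 1
        = PySem.List.pyRange 0 (n : Int) 1 ++ [(n : Int)] := by
      have := PySem.List.pyRange_one_succ_right (a := 0) (b := (n : Int)) (by positivity)
      push_cast
      exact this
    rw [hstep, List.foldl_append, ih, List.range_succ, List.map_append]
    have hk : n % short.length < short.length := Nat.mod_lt _ hm
    simp only [List.foldl_cons, List.foldl_nil]
    rw [PySem.Int.mod_natCast, PySem.List.pyGet?_natCast]
    simp [cyc, List.getElem?_eq_getElem hk]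

lemma core (long short : List Char) (h : short = [] → long = []) :
    String.ofList ((PySem.List.pyRange 0 (long.length : Int) 1).foldl
      (fun acc i => acc ++ (PySem.List.pyGet? short (PySem.Int.mod i (short.length : Int))).toList) [])
    = (if long.isEmpty then "" else
        String.ofList ((List.replicate (long.length / short.length + 1) short).flatten.take long.length)) := by
  by_cases hl : long = []
  · subst hl
    simp [PySem.List.pyRange_one_eq_nil]
  · have hs : short ≠ [] := fun he => hl (h he)
    have hm : 0 < short.length := List.length_pos_iff.mpr hs
    rw [if_neg (by simpa [List.isEmpty_iff] using hl)]
    congr 1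
    rw [foldl_loop_eq short hs long.length,
        flatten_replicate_take short hs (long.length / short.length + 1) long.length ?_]
    have h1 := Nat.div_add_mod long.length short.length
    have h2 : long.length % short.length < short.length := Nat.mod_lt _ hm
    calc long.length = short.length * (long.length / short.length) + long.length % short.length := h1.symm
      _ ≤ short.length * (long.length / short.length) + short.length := by omega
      _ = (long.length / short.length + 1) * short.length := by ring

lemma toList_nil_iff (s : String) : s.toList = [] ↔ s = "" := by
  constructor
  · intro h
    have := congrArg String.ofList h
    simpa using this
  · rintro rfl; rfl

-- ===== VERDICT (by name: the statement is the Claim_ definition above) =====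
theorem lengthen_spec : Claim_equal_lengthen := by
  intro s1 s2 _ hpre
  unfold Pre_lengthen at hpre
  unfold Spec_lengthen lengthen lengthen_alt
  by_cases h : s1.toList.length > s2.toList.length
  · simp only [if_pos h]
    apply core
    intro he
    rw [toList_nil_iff] at he ⊢
    exact hpre.mpr he
  · simp only [if_neg h]
    apply core
    intro he
    rw [toList_nil_iff] at he ⊢
    exact hpre.mp he
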